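-- pv_equiv track=rewrite | github.com/Pranavi2002/CodePath-TP-102-Course | Unit-2/s1v1p8.py | num_popular_pairs
-- ===== SOURCE A (Python) =====
-- def num_popular_pairs(popularity_scores):
--     freq_map = {}
--     for score in popularity_scores:
--         if score in freq_map:
--             freq_map[score] += 1
--         else:
--             freq_map[score] = 1
--
--     pairs = 0
--     sum = 0
--     for value in freq_map:
--         if freq_map[value] != 1:
--             n = freq_map[value]
--             sum = (n * (n-1))//2
--             pairs += sum
--     return pairs
-- ===== SOURCE B (Python) =====
-- def num_popular_pairs(popularity_scores):
--     seen = {}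
--     pairs = 0
--     for score in popularity_scores:
--         pairs += seen.get(score, 0)
--         seen[score] = seen.get(score, 0) + 1
--     return pairs
-- ===== Notes on version B (the rewrite author's own statement) =====
-- stated objective: simpler
-- what changed: Replaces A's two-phase build-counter-then-sum-n*(n-1)//2-per-group approach with a single pass that accumulates, for each element, the number of earlier equal elements.
import Mathlib
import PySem

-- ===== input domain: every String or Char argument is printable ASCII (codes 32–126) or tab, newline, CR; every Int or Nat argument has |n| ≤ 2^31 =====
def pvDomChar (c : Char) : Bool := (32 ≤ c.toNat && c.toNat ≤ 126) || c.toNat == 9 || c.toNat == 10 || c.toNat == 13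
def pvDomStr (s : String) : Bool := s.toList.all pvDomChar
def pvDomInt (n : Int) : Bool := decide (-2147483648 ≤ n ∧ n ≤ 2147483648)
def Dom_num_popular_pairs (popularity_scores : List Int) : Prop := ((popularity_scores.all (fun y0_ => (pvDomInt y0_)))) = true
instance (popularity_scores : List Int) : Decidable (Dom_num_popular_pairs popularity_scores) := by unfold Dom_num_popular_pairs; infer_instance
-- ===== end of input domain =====

-- B: single pass accumulating, per element, the number of earlier equal elements
-- (A builds a frequency dict, then sums n*(n-1)//2 per group); objective: simpler.

-- ===== PORT A =====
def num_popular_pairs (popularity_scores : List Int) : Int :=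
  -- first loop: build freq_map
  let freq_map : PySem.Dict Int Int :=
    popularity_scores.foldl (fun d score =>
      match d.get? score with                 -- 'if score in freq_map'
      | some v => d.insert score (v + 1)      -- 'freq_map[score] += 1'
      | none   => d.insert score 1)           -- 'freq_map[score] = 1'
      PySem.Dict.empty
  -- second loop: 'for value in freq_map' iterates the keys in insertion order;
  -- 'freq_map[value]' never raises here (value is a key), ported as getD _ 0
  let pairs : Int :=
    freq_map.keys.foldl (fun pairs value =>
      if freq_map.getD value 0 ≠ 1 then
        let n := freq_map.getD value 0
        pairs + PySem.Int.floordiv (n * (n - 1)) 2   -- sum = n*(n-1)//2; pairs += sum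
      else pairs) 0
  pairs

-- ===== PORT B =====
def num_popular_pairs_alt (popularity_scores : List Int) : Int :=
  (popularity_scores.foldl (fun (st : PySem.Dict Int Int × Int) score =>
      (st.1.insert score (st.1.getD score 0 + 1),   -- seen[score] = seen.get(score,0)+1
       st.2 + st.1.getD score 0))                   -- pairs += seen.get(score, 0)
    (PySem.Dict.empty, 0)).2

-- ===== PRECONDITION & SPEC =====
def Spec_num_popular_pairs (popularity_scores : List Int) (out : Int) : Prop := out = num_popular_pairs_alt popularity_scores
instance (popularity_scores : List Int) (out : Int) : Decidable (Spec_num_popular_pairs popularity_scores out) := by unfold Spec_num_popular_pairs; infer_instance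

-- ===== CLAIM (what is proved, stated in full; the proofs are below) =====
def Claim_equal_num_popular_pairs : Prop := ∀ (popularity_scores : List Int), Dom_num_popular_pairs popularity_scores → Spec_num_popular_pairs popularity_scores (num_popular_pairs popularity_scores)

-- ===== LEMMAS AND PROOFS =====

def fd (n : Int) : Int := PySem.Int.floordiv (n * (n - 1)) 2

def sumPairs (xs : List Int) : Int :=
  ((PySem.Set.ofList xs).map (fun k => fd ((xs.count k : Int)))).sum

theorem a_eq_sumPairs (xs : List Int) : num_popular_pairs xs = sumPairs xs := by
  unfold num_popular_pairs
  have hstep : (fun (d : PySem.Dict Int Int) (score : Int) =>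
      match d.get? score with
      | some v => d.insert score (v + 1)
      | none   => d.insert score 1) =
      (fun d x => d.insert x (d.getD x 0 + 1)) := by
    funext d x
    cases h : d.get? x <;> simp [PySem.Dict.getD_eq_get?_getD, h]
  simp only [hstep, PySem.Dict.foldl_insert_getD_add_one_eq_counter,
    PySem.Dict.keys_counter, PySem.Dict.getD_counter]
  rw [PySem.List.foldl_congr_mem _ _
      (fun pairs value => pairs + fd ((xs.count value : Int))) 0 ?_,
    PySem.List.foldl_add]
  · simp [sumPairs]
  · intro acc k hk
    by_cases h1 : ((xs.count k : Int)) = 1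
    · simp [h1, fd]
    · simp [h1, fd]

theorem fd_succ (c : Int) : fd (c + 1) = fd c + c := by
  unfold fd
  rw [PySem.Int.floordiv_eq_ediv_of_pos (by norm_num : (0:Int) < 2),
    PySem.Int.floordiv_eq_ediv_of_pos (by norm_num : (0:Int) < 2)]
  have h : (c + 1) * (c + 1 - 1) = c * (c - 1) + c * 2 := by ring
  rw [h, Int.add_mul_ediv_right _ _ (by norm_num : (2:Int) ≠ 0)]

theorem sum_ite_single (S : List Int) (x : Int) (c : Int) (hnd : S.Nodup) (hx : x ∈ S) :
    (S.map (fun k => if k = x then c else 0)).sum = c := by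
  induction S with
  | nil => cases hx
  | cons b S ih =>
    simp only [List.map_cons, List.sum_cons]
    rcases List.mem_cons.mp hx with h | h
    · subst h
      have hz : ∀ k ∈ S, (if k = x then c else 0) = 0 := by
        intro k hk
        have : k ≠ x := fun he => (List.nodup_cons.mp hnd).1 (he ▸ hk)
        simp [this]
      rw [if_pos rfl, List.map_congr_left hz]
      simp
    · have hbx : b ≠ x := fun he => (List.nodup_cons.mp hnd).1 (he ▸ h)
      rw [if_neg hbx, ih (List.nodup_cons.mp hnd).2 h]
      simp

theorem sumPairs_append (xs : List Int) (x : Int) :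
    sumPairs (xs ++ [x]) = sumPairs xs + (xs.count x : Int) := by
  unfold sumPairs
  rw [PySem.Set.ofList_append_singleton]
  have hcount : ∀ k, ((xs ++ [x]).count k : Int) =
      (xs.count k : Int) + (if k = x then 1 else 0) := by
    intro k
    rw [List.count_append]
    by_cases h : k = x
    · simp [h]
    · simp [List.count_singleton, h]; exact fun he => h he.symm
  by_cases hmem : x ∈ xs
  · rw [PySem.Set.add_of_mem ((PySem.Set.mem_ofList _ _).mpr hmem)]
    have hpt : ∀ k ∈ PySem.Set.ofList xs,
        fd (((xs ++ [x]).count k : Int)) =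
        fd ((xs.count k : Int)) + (if k = x then (xs.count x : Int) else 0) := by
      intro k _
      rw [hcount k]
      by_cases h : k = x
      · subst h; rw [if_pos rfl, if_pos rfl, fd_succ]
      · rw [if_neg h, if_neg h, add_zero, add_zero]
    rw [List.map_congr_left hpt, PySem.List.sum_map_add_int,
      sum_ite_single _ x _ (PySem.Set.nodup_ofList xs) ((PySem.Set.mem_ofList _ _).mpr hmem)]
  · rw [PySem.Set.add_of_not_mem (fun hc => hmem ((PySem.Set.mem_ofList _ _).mp hc))]
    have hpt : ∀ k ∈ PySem.Set.ofList xs,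
        fd (((xs ++ [x]).count k : Int)) = fd ((xs.count k : Int)) := by
      intro k hk
      have hkx : k ≠ x := fun he => hmem (he ▸ ((PySem.Set.mem_ofList _ _).mp hk))
      rw [hcount k, if_neg hkx, add_zero]
    rw [List.map_append, List.sum_append, List.map_congr_left hpt]
    have h0 : (xs.count x) = 0 := List.count_eq_zero.mpr hmem
    simp [h0, fd]

theorem alt_fold_fst (l : List Int) (d : PySem.Dict Int Int) (p : Int) :
    (l.foldl (fun (st : PySem.Dict Int Int × Int) score =>
      (st.1.insert score (st.1.getD score 0 + 1),
       st.2 + st.1.getD score 0)) (d, p)).1 =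
    l.foldl (fun d x => d.insert x (d.getD x 0 + 1)) d := by
  induction l generalizing d p with
  | nil => rfl
  | cons a l ih => simp only [List.foldl_cons]; exact ih _ _

theorem b_eq_sumPairs (xs : List Int) : num_popular_pairs_alt xs = sumPairs xs := by
  induction xs using List.reverseRecOn with
  | nil => rfl
  | append_singleton xs x ih =>
    unfold num_popular_pairs_alt at ih ⊢
    rw [List.foldl_append, List.foldl_cons, List.foldl_nil, sumPairs_append, ← ih]
    simp only [alt_fold_fst, PySem.Dict.foldl_insert_getD_add_one_eq_counter,
      PySem.Dict.getD_counter]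

-- ===== VERDICT (by name: the statement is the Claim_ definition above) =====
theorem num_popular_pairs_spec : Claim_equal_num_popular_pairs := by
  intro xs _
  unfold Spec_num_popular_pairs
  rw [a_eq_sumPairs, b_eq_sumPairs]
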